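-- pv_equiv track=rewrite | github.com/junohkwon/Python | ch14-B_More_Programming_Practice_2.py | make_Dict_number
-- ===== SOURCE A (Python) =====
-- def make_Dict_number(lst):
--     lst = sorted(lst)
--     dict ={}
--     for i in lst:
--         if i in dict:
--             dict[i] += 1
--         else:
--             dict[i] = 1
--
--     return dict
-- ===== SOURCE B (Python) =====
-- def make_Dict_number(lst):
--     return {i: lst.count(i) for i in sorted(set(lst))}
-- ===== Notes on version B (the rewrite author's own statement) =====
-- stated objective: idiomatic
-- what changed: Replaces the incremental counter dict built in one pass over the sorted list by a dict comprehension over sorted(set(lst)) that counts each distinct key with lst.count.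
import Mathlib
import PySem

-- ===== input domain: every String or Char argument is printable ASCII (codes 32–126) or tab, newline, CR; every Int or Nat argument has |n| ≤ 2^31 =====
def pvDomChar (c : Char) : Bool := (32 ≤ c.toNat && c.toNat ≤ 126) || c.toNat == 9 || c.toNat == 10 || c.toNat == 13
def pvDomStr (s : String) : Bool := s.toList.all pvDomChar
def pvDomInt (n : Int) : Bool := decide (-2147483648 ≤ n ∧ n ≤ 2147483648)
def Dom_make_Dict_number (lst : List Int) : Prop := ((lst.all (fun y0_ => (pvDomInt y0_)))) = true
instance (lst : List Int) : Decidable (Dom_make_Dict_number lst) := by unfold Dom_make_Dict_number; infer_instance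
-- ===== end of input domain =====

-- B replaces A's incremental counter loop by a dict comprehension over sorted(set(lst))
-- counting each distinct key with lst.count (idiomatic; no running dict state).

-- ===== PORT A =====
def make_Dict_number (lst : List Int) : List (Int × Int) :=
  let lst' := PySem.List.sorted lst (fun x => x) false
  let d := lst'.foldl
    (fun d i =>
      if d.contains i then d.insert i (d.getD i 0 + 1)
      else d.insert i 1)
    (PySem.Dict.empty : PySem.Dict Int Int)
  d.items

-- ===== PORT B =====
-- dict comprehension: its keys sorted(set(lst)) are distinct, so the resulting
-- dict's items are exactly this map, in key order.
def make_Dict_number_alt (lst : List Int) : List (Int × Int) :=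
  (PySem.List.sorted (PySem.Set.ofList lst) (fun x => x) false).map
    (fun i => (i, (PySem.List.count lst i : Int)))

-- ===== PRECONDITION & SPEC =====
def Spec_make_Dict_number (lst : List Int) (out : List (Int × Int)) : Prop := out = make_Dict_number_alt lst
instance (lst : List Int) (out : List (Int × Int)) : Decidable (Spec_make_Dict_number lst out) := by unfold Spec_make_Dict_number; infer_instance

-- ===== CLAIM (what is proved, stated in full; the proofs are below) =====
def Claim_equal_make_Dict_number : Prop := ∀ (lst : List Int), Dom_make_Dict_number lst → Spec_make_Dict_number lst (make_Dict_number lst)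

-- ===== LEMMAS AND PROOFS =====

-- A's loop body is exactly the Counter step (when the key is absent, getD gives 0).
lemma step_eq_counter_step :
    (fun (d : PySem.Dict Int Int) (i : Int) =>
      if d.contains i then d.insert i (d.getD i 0 + 1)
      else d.insert i 1) =
    (fun d i => d.modify i 0 (· + 1)) := by
  funext d i
  by_cases h : d.contains i = true
  · simp [PySem.Dict.modify, h]
  · have h0 : d.getD i 0 = 0 :=
      PySem.Dict.getD_of_not_contains d (k := i) 0 (by simpa using h)
    simp [PySem.Dict.modify, h, h0]

-- set(xs) keeps a subsequence of xs (first occurrences, in order).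
lemma foldl_add_sublist {α : Type} [BEq α] (xs : List α) :
    ∀ s : List α, (xs.foldl PySem.Set.add s).Sublist (s ++ xs) := by
  induction xs with
  | nil => intro s; simp
  | cons x xs ih =>
    intro s
    have h1 : (xs.foldl PySem.Set.add (PySem.Set.add s x)).Sublist
        (PySem.Set.add s x ++ xs) := ih _
    have h2 : (PySem.Set.add s x).Sublist (s ++ [x]) := by
      unfold PySem.Set.add
      split
      · exact List.sublist_append_left s [x]
      · simp
    have h3 : ((s ++ [x]) ++ xs) = s ++ (x :: xs) := by simp
    have := h1.trans (h2.append_right xs)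
    simpa [h3] using this

lemma ofList_sublist {α : Type} [BEq α] (xs : List α) :
    (PySem.Set.ofList xs).Sublist xs := by
  have := foldl_add_sublist xs []
  simpa [PySem.Set.ofList_eq_foldl] using this

-- set(sorted(lst)) is strictly increasing.
lemma ofList_sorted_pairwise_lt (lst : List Int) :
    (PySem.Set.ofList (PySem.List.sorted lst (fun x => x) false)).Pairwise (· < ·) := by
  have hle : (PySem.Set.ofList (PySem.List.sorted lst (fun x => x) false)).Pairwise (· ≤ ·) :=
    (PySem.List.sorted_pairwise lst (fun x => x)).sublist
      (ofList_sublist _)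
  have hne : (PySem.Set.ofList (PySem.List.sorted lst (fun x => x) false)).Pairwise (· ≠ ·) :=
    PySem.Set.nodup_ofList _
  exact (hle.and hne).imp (fun h => lt_of_le_of_ne h.1 h.2)

-- sorted(set(lst)) = set(sorted(lst)).
lemma sorted_ofList_eq (lst : List Int) :
    PySem.List.sorted (PySem.Set.ofList lst) (fun x => x) false =
    PySem.Set.ofList (PySem.List.sorted lst (fun x => x) false) := by
  apply PySem.List.sorted_eq_of_perm_of_pairwise_lt
  · rw [List.perm_ext_iff_of_nodup (PySem.Set.nodup_ofList _) (PySem.Set.nodup_ofList _)]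
    intro a
    simp [PySem.Set.mem_ofList, PySem.List.mem_sorted]
  · exact ofList_sorted_pairwise_lt lst

-- ===== VERDICT (by name: the statement is the Claim_ definition above) =====
theorem make_Dict_number_spec : Claim_equal_make_Dict_number := by
  intro lst _
  unfold Spec_make_Dict_number make_Dict_number make_Dict_number_alt
  simp only
  rw [step_eq_counter_step, ← PySem.Dict.counter_eq_foldl, PySem.Dict.items_counter,
    sorted_ofList_eq]
  apply List.map_congr_left
  intro k hk
  simp [PySem.List.count,
    ((PySem.List.sorted_perm lst (fun x => x) false).count_eq k)]
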